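-- pv_equiv track=rewrite | github.com/rupran/adventofcode | 2016/11.py | is_good_state
-- ===== SOURCE A (Python) =====
-- def is_good_state(state):
--     # Not underground or over the top
--     if state[0] == 0 or state[0] == 5:
--         return False
--     # No chip with _other_ RTG on same floor
--     for cur_chip_idx in range(2, len(state), 2):
--         if state[cur_chip_idx] == state[cur_chip_idx-1]:
--             continue
--         for j in range(1, len(state), 2):
--             if state[cur_chip_idx] == state[j]:
--                 return False
--     return True
-- ===== SOURCE B (Python) =====
-- def is_good_state(state):
--     # Elevator underground or over the top
--     if state[0] == 0 or state[0] == 5: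
--         return False
--     # Sort generator floors and floors of chips separated from their generator,
--     # then test intersection with a two-pointer merge scan over the sorted lists.
--     gens = sorted(state[i] for i in range(1, len(state), 2))
--     exposed = sorted(state[i] for i in range(2, len(state), 2) if state[i] != state[i - 1])
--     i = j = 0
--     while i < len(gens) and j < len(exposed):
--         if gens[i] < exposed[j]:
--             i += 1
--         elif exposed[j] < gens[i]:
--             j += 1
--         else:
--             return False
--     return True
-- ===== Notes on version B (the rewrite author's own statement) =====
-- stated objective: alternative
-- what changed: Replaced A's nested chip-by-generator scan with sorting the generator floors and the exposed-chip floors and detecting a common floor by a two-pointer merge intersection scan.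
import Mathlib
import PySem

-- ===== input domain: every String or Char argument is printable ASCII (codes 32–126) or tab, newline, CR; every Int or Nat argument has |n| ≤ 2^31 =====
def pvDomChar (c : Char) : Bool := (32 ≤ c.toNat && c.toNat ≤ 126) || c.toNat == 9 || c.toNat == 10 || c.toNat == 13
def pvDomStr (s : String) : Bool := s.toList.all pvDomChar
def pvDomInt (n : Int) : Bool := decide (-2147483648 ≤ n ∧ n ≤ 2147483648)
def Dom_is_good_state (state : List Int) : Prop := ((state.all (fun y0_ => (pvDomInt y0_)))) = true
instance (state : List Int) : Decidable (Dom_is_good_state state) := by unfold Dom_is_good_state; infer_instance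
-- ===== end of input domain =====

-- B replaces A's nested chip-by-generator scan by sorting the generator floors and the
-- exposed-chip floors and a two-pointer merge intersection scan (alternative algorithm).

-- ===== PORT A =====
-- the outer 'for cur_chip_idx in range(2, len(state), 2)' loop; the inner
-- 'for j' loop with its early 'return False' is the .any over range(1, len, 2)
def isGoodChipsA (state : List Int) : List Int → Bool
  | [] => true
  | i :: rest =>
      if PySem.List.pyGetD state i 0 == PySem.List.pyGetD state (i - 1) 0 then
        isGoodChipsA state rest
      else if (PySem.List.pyRange 1 (state.length : Int) 2).any
                (fun j => PySem.List.pyGetD state i 0 == PySem.List.pyGetD state j 0) then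
        false
      else
        isGoodChipsA state rest

def is_good_state (state : List Int) : Bool :=
  match PySem.List.pyGet? state 0 with
  | none => false   -- IndexError on empty input; excluded by Pre_
  | some s0 =>
      if s0 == 0 || s0 == 5 then false
      else isGoodChipsA state (PySem.List.pyRange 2 (state.length : Int) 2)

-- ===== PORT B =====
-- the 'while i < len(gens) and j < len(exposed)' two-pointer scan; advancing a
-- pointer past a consumed element is dropping the head of that suffix
def mergeDisjoint : List Int → List Int → Bool
  | _, [] => true
  | [], _ :: _ => true
  | a :: as, b :: bs =>
      if a < b then mergeDisjoint as (b :: bs)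
      else if b < a then mergeDisjoint (a :: as) bs
      else false
termination_by as bs => as.length + bs.length

def is_good_state_alt (state : List Int) : Bool :=
  match PySem.List.pyGet? state 0 with
  | none => false   -- IndexError on empty input; excluded by Pre_
  | some s0 =>
      if s0 == 0 || s0 == 5 then false
      else
        let gens : List Int :=
          PySem.List.sorted ((PySem.List.pyRange 1 (state.length : Int) 2).map
            (fun i => PySem.List.pyGetD state i 0)) (fun x => x) false
        let exposed : List Int :=
          PySem.List.sorted (((PySem.List.pyRange 2 (state.length : Int) 2).filter
              (fun i => PySem.List.pyGetD state i 0 != PySem.List.pyGetD state (i - 1) 0)).map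
            (fun i => PySem.List.pyGetD state i 0)) (fun x => x) false
        mergeDisjoint gens exposed

-- ===== PRECONDITION & SPEC =====
-- Pre_ excludes only the empty list, on which A raises IndexError at state[0].
def Pre_is_good_state (state : List Int) : Prop := state ≠ []
instance (state : List Int) : Decidable (Pre_is_good_state state) := by unfold Pre_is_good_state; infer_instance
def pvWitness_is_good_state : List Int := [1, 2, 2, 3, 3]

def Spec_is_good_state (state : List Int) (out : Bool) : Prop := out = is_good_state_alt state
instance (state : List Int) (out : Bool) : Decidable (Spec_is_good_state state out) := by unfold Spec_is_good_state; infer_instance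

-- ===== CLAIM (what is proved, stated in full; the proofs are below) =====
def Claim_equal_is_good_state : Prop := ∀ (state : List Int), Dom_is_good_state state → Pre_is_good_state state → Spec_is_good_state state (is_good_state state)

-- ===== LEMMAS AND PROOFS =====

-- A's outer loop returns true iff no chip index in l is both separated from its
-- generator and on some generator floor.
theorem isGoodChipsA_eq_all (state : List Int) (l : List Int) :
    isGoodChipsA state l
      = l.all (fun i =>
          (PySem.List.pyGetD state i 0 == PySem.List.pyGetD state (i - 1) 0)
          || !((PySem.List.pyRange 1 (state.length : Int) 2).any
                (fun j => PySem.List.pyGetD state i 0 == PySem.List.pyGetD state j 0))) := by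
  induction l with
  | nil => rfl
  | cons i rest ih =>
      simp only [isGoodChipsA, List.all_cons]
      split_ifs with h1 h2
      · simp [h1, ih]
      · simp [h1, h2]
      · simp [h1, h2, ih]

-- the two-pointer scan on two ascending lists returns true iff they share no element
theorem mergeDisjoint_true_iff (as bs : List Int)
    (ha : as.Pairwise (· ≤ ·)) (hb : bs.Pairwise (· ≤ ·)) :
    mergeDisjoint as bs = true ↔ ∀ x ∈ as, x ∉ bs := by
  fun_induction mergeDisjoint as bs with
  | case1 => simp
  | case2 => simp
  | case3 a as b bs hab ih =>
      rw [List.pairwise_cons] at ha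
      rw [ih ha.2 hb]
      constructor
      · intro h x hx
        rcases List.mem_cons.mp hx with rfl | hx
        · -- a < b ≤ every element of b :: bs
          intro hmem
          rcases List.mem_cons.mp hmem with rfl | hmem
          · exact absurd hab (lt_irrefl _)
          · rw [List.pairwise_cons] at hb
            exact absurd (lt_of_lt_of_le hab (hb.1 _ hmem)) (lt_irrefl _)
        · exact h x hx
      · intro h x hx; exact h x (List.mem_cons_of_mem _ hx)
  | case4 a as b bs hab hba ih =>
      rw [List.pairwise_cons] at hb
      rw [ih ha hb.2]
      constructor
      · intro h x hx hmem
        rcases List.mem_cons.mp hmem with rfl | hmem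
        · rcases List.mem_cons.mp hx with rfl | hx
          · exact absurd hba (lt_irrefl _)
          · rw [List.pairwise_cons] at ha
            exact absurd (lt_of_lt_of_le hba (ha.1 _ hx)) (lt_irrefl _)
        · exact h x hx hmem
      · intro h x hx hmem; exact h x hx (List.mem_cons_of_mem _ hmem)
  | case5 a as b bs hab hba =>
      have : a = b := le_antisymm (not_lt.mp hba) (not_lt.mp hab)
      subst this
      simp

theorem is_good_state_spec_aux (state : List Int) :
    is_good_state state = is_good_state_alt state := by
  unfold is_good_state is_good_state_alt
  cases hg : PySem.List.pyGet? state 0 with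
  | none => rfl
  | some s0 =>
      dsimp only
      by_cases h05 : (s0 == 0 || s0 == 5) = true
      · simp [h05]
      · rw [if_neg h05, if_neg h05]
        rw [isGoodChipsA_eq_all, Bool.eq_iff_iff,
            mergeDisjoint_true_iff _ _
              (PySem.List.sorted_pairwise _ (fun x : Int => x))
              (PySem.List.sorted_pairwise _ (fun x : Int => x))]
        simp only [List.all_eq_true, PySem.List.mem_sorted, List.mem_map, List.mem_filter,
          Bool.or_eq_true, Bool.not_eq_eq_eq_not, Bool.not_true, List.any_eq_false,
          beq_iff_eq, bne_iff_ne, not_exists, not_and]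
        constructor
        · rintro hall x ⟨jg, hjg, hx⟩ ic ⟨hic, hne⟩ hcx
          rcases hall ic hic with hown | hnone
          · exact hne hown
          · have := hnone jg hjg
            rw [hcx, hx] at this
            exact this rfl
        · intro hdis i hi
          by_cases hown : PySem.List.pyGetD state i 0 = PySem.List.pyGetD state (i - 1) 0
          · exact Or.inl hown
          · right
            intro j hj hc
            exact hdis (PySem.List.pyGetD state i 0) ⟨j, hj, hc.symm⟩ i ⟨hi, hown⟩ rfl

-- ===== VERDICT (by name: the statement is the Claim_ definition above) =====
theorem is_good_state_spec : Claim_equal_is_good_state := by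
  intro state _ _
  exact is_good_state_spec_aux state
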